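-- pv_equiv track=rewrite | github.com/HeHaodong2004/Hybrid_CBS | RL_test.py | detect_conflict
-- ===== SOURCE A (Python) =====
-- from typing import List, Tuple, Dict, Set, Optional
--
-- Position = Tuple[int, int]
--
-- Path = List[Position]
--
-- def detect_conflict(p1: Path, p2: Path) -> Optional[Tuple[int, Position]]:
--     max_len = max(len(p1), len(p2))
--     for t in range(max_len):
--         a1 = p1[min(t, len(p1)-1)]
--         a2 = p2[min(t, len(p2)-1)]
--         if a1 == a2:
--             return (t, a1)
--         if t > 0:
--             a1_prev = p1[min(t-1, len(p1)-1)]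
--             a2_prev = p2[min(t-1, len(p2)-1)]
--             if a1 == a2_prev and a2 == a1_prev:
--                 return (t, a1)
--     return None
-- ===== SOURCE B (Python) =====
-- def detect_conflict(p1, p2):
--     n = max(len(p1), len(p2))
--     q1 = p1 if len(p1) == n else p1 + [p1[-1]] * (n - len(p1))
--     q2 = p2 if len(p2) == n else p2 + [p2[-1]] * (n - len(p2))
--     tv = next((t for t in range(n) if q1[t] == q2[t]), None)
--     te = next((t for t in range(1, n) if q1[t] == q2[t - 1] and q2[t] == q1[t - 1]), None)
--     if tv is not None and (te is None or tv <= te):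
--         return (tv, q1[tv])
--     if te is not None:
--         return (te, q1[te])
--     return None
-- ===== Notes on version B (the rewrite author's own statement) =====
-- stated objective: alternative
-- what changed: A interleaves vertex- and edge-conflict checks in one clamped-index loop; B pads both paths to equal length once, runs two independent scans (earliest vertex coincidence; earliest position swap) and merges the two results with vertex winning ties.
import Mathlib
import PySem

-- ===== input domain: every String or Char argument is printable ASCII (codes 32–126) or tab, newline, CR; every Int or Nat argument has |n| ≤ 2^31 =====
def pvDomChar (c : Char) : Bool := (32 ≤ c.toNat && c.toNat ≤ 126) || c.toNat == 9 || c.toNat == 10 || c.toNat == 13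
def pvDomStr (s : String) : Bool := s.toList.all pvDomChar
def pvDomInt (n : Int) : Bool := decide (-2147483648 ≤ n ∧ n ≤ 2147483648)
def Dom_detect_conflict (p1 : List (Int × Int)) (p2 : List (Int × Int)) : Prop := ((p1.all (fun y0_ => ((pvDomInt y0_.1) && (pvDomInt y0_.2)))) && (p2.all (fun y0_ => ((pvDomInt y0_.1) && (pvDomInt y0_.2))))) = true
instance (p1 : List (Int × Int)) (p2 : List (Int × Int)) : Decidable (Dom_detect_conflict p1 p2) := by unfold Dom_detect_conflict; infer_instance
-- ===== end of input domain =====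

-- B pads both paths to equal length once, then runs two independent scans (earliest vertex
-- coincidence; earliest swap) and merges them, instead of A's single interleaved clamped-index loop.

-- ===== PORT A =====
-- loop 'for t in range(max_len)' of A, as fuel recursion; pyGet? none = IndexError (empty path)
def pvAGo (p1 : List (Int × Int)) (p2 : List (Int × Int)) (t : Nat) (fuel : Nat) :
    Option (Int × (Int × Int)) :=
  match fuel with
  | 0 => none
  | fuel + 1 =>
    match PySem.List.pyGet? p1 (min (t : Int) ((p1.length : Int) - 1)),
          PySem.List.pyGet? p2 (min (t : Int) ((p2.length : Int) - 1)) with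
    | some a1, some a2 =>
      if a1 = a2 then some ((t : Int), a1)
      else if 0 < t then
        match PySem.List.pyGet? p1 (min ((t : Int) - 1) ((p1.length : Int) - 1)),
              PySem.List.pyGet? p2 (min ((t : Int) - 1) ((p2.length : Int) - 1)) with
        | some b1, some b2 =>
          if a1 = b2 ∧ a2 = b1 then some ((t : Int), a1) else pvAGo p1 p2 (t + 1) fuel
        | _, _ => none
      else pvAGo p1 p2 (t + 1) fuel
    | _, _ => none

def detect_conflict (p1 : List (Int × Int)) (p2 : List (Int × Int)) : Option (Int × (Int × Int)) :=
  pvAGo p1 p2 0 (max p1.length p2.length)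

-- ===== PORT B =====
def pvD : Int × Int := (0, 0)

-- q = p if len(p) == n else p + [p[-1]] * (n - len(p)); p[-1] on empty p is an IndexError (→ [])
def pvPad (p : List (Int × Int)) (n : Nat) : List (Int × Int) :=
  if p.length = n then p
  else match PySem.List.pyGet? p (-1) with
       | some x => p ++ List.replicate (n - p.length) x
       | none => []

def detect_conflict_alt (p1 : List (Int × Int)) (p2 : List (Int × Int)) : Option (Int × (Int × Int)) :=
  let n := max p1.length p2.length
  let q1 := pvPad p1 n
  let q2 := pvPad p2 n
  let tv := (List.range' 0 n).find? (fun t => decide (q1.getD t pvD = q2.getD t pvD))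
  let te := (List.range' 1 (n - 1)).find? (fun t =>
      decide (q1.getD t pvD = q2.getD (t - 1) pvD ∧ q2.getD t pvD = q1.getD (t - 1) pvD))
  match tv, te with
  | some v, some e =>
      if v ≤ e then some ((v : Int), q1.getD v pvD) else some ((e : Int), q1.getD e pvD)
  | some v, none => some ((v : Int), q1.getD v pvD)
  | none, some e => some ((e : Int), q1.getD e pvD)
  | none, none => none

-- ===== PRECONDITION & SPEC =====
-- Pre_ excludes exactly the inputs on which Python A raises IndexError: one path empty while
-- the other is not (p[-1] on the empty path); Python B raises there too.
def Pre_detect_conflict (p1 : List (Int × Int)) (p2 : List (Int × Int)) : Prop :=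
  (p1 = [] ↔ p2 = [])
instance (p1 : List (Int × Int)) (p2 : List (Int × Int)) : Decidable (Pre_detect_conflict p1 p2) := by
  unfold Pre_detect_conflict; infer_instance

def pvWitness_detect_conflict : (List (Int × Int)) × (List (Int × Int)) :=
  ([(0, 0), (1, 0)], [(1, 1), (0, 1)])

def Spec_detect_conflict (p1 : List (Int × Int)) (p2 : List (Int × Int)) (out : Option (Int × (Int × Int))) : Prop := out = detect_conflict_alt p1 p2
instance (p1 : List (Int × Int)) (p2 : List (Int × Int)) (out : Option (Int × (Int × Int))) : Decidable (Spec_detect_conflict p1 p2 out) := by unfold Spec_detect_conflict; infer_instance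

-- ===== CLAIM (what is proved, stated in full; the proofs are below) =====
def Claim_equal_detect_conflict : Prop := ∀ (p1 : List (Int × Int)) (p2 : List (Int × Int)), Dom_detect_conflict p1 p2 → Pre_detect_conflict p1 p2 → Spec_detect_conflict p1 p2 (detect_conflict p1 p2)

-- ===== LEMMAS AND PROOFS =====

-- merge of the two scan results (proof-side restatement of B's final match)
def pvMrg (tv te : Option Nat) (q1 : List (Int × Int)) : Option (Int × (Int × Int)) :=
  match tv, te with
  | some v, some e =>
      if v ≤ e then some ((v : Int), q1.getD v pvD) else some ((e : Int), q1.getD e pvD)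
  | some v, none => some ((v : Int), q1.getD v pvD)
  | none, some e => some ((e : Int), q1.getD e pvD)
  | none, none => none

lemma pvPad_getD (p : List (Int × Int)) (n t : Nat) (h : p ≠ []) (hln : p.length ≤ n)
    (ht : t < n) : (pvPad p n).getD t pvD = p.getD (min t (p.length - 1)) pvD := by
  have hm : 1 ≤ p.length := List.length_pos_iff.mpr h
  unfold pvPad
  by_cases he : p.length = n
  · rw [if_pos he]
    have : min t (p.length - 1) = t := by omega
    rw [this]
  · have hl : p.getLast? = some (p.getLast h) := List.getLast?_eq_some_getLast h
    rw [if_neg he, PySem.List.pyGet?_neg_one, hl]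
    by_cases htm : t < p.length
    · have : min t (p.length - 1) = t := by omega
      rw [this]
      rw [List.getD_eq_getElem _ _ (by simp; omega),
          List.getD_eq_getElem _ _ (by omega)]
      simp [List.getElem_append_left htm]
    · have : min t (p.length - 1) = p.length - 1 := by omega
      rw [this]
      rw [List.getD_eq_getElem _ _ (by simp; omega),
          List.getD_eq_getElem _ _ (by omega)]
      rw [List.getElem_append_right (by omega)]
      simp only [List.getElem_replicate]
      rw [List.getLast_eq_getElem]

lemma pvAccess (p : List (Int × Int)) (t : Nat) (h : p ≠ []) :
    PySem.List.pyGet? p (min (t : Int) ((p.length : Int) - 1)) =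
      some (p.getD (min t (p.length - 1)) pvD) := by
  have hm : 1 ≤ p.length := List.length_pos_iff.mpr h
  have hidx : min (t : Int) ((p.length : Int) - 1) = ((min t (p.length - 1) : Nat) : Int) := by
    omega
  rw [hidx, PySem.List.pyGet?_natCast]
  rw [List.getElem?_eq_getElem (by omega), List.getD_eq_getElem _ _ (by omega)]

lemma pvFind?_range'_ge {s l e : Nat} {f : Nat → Bool}
    (h : (List.range' s l).find? f = some e) : s ≤ e := by
  have := List.mem_range'.mp (List.mem_of_find?_eq_some h)
  omega

lemma pvAGo_eq (p1 p2 : List (Int × Int)) (n : Nat) (h1 : p1 ≠ []) (h2 : p2 ≠ [])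
    (hn1 : p1.length ≤ n) (hn2 : p2.length ≤ n) (t : Nat) (ht : t ≤ n) :
    pvAGo p1 p2 t (n - t) =
      pvMrg ((List.range' t (n - t)).find?
              (fun s => decide ((pvPad p1 n).getD s pvD = (pvPad p2 n).getD s pvD)))
            ((List.range' (max t 1) (n - max t 1)).find?
              (fun s => decide ((pvPad p1 n).getD s pvD = (pvPad p2 n).getD (s - 1) pvD ∧
                                (pvPad p2 n).getD s pvD = (pvPad p1 n).getD (s - 1) pvD)))
            (pvPad p1 n) := by
  set q1 := pvPad p1 n with hq1
  set q2 := pvPad p2 n with hq2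
  obtain ⟨fuel, hf⟩ : ∃ f, n - t = f := ⟨n - t, rfl⟩
  induction fuel generalizing t with
  | zero =>
    have hz2 : n - max t 1 = 0 := by omega
    rw [hf]
    simp [pvAGo, hz2, pvMrg]
  | succ fuel ih =>
    have htn : t < n := by omega
    rw [hf]
    unfold pvAGo
    rw [pvAccess p1 t h1, pvAccess p2 t h2,
        ← pvPad_getD p1 n t h1 hn1 htn, ← pvPad_getD p2 n t h2 hn2 htn, ← hq1, ← hq2]
    rw [List.range'_succ] at *
    dsimp only
    by_cases hv : q1.getD t pvD = q2.getD t pvD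
    · -- vertex conflict at t
      simp only [hv, if_true]
      rw [List.find?_cons_of_pos (by simp <;> exact hv)]
      rcases hte : (List.range' (max t 1) (n - max t 1)).find?
          (fun s => decide (q1.getD s pvD = q2.getD (s - 1) pvD ∧
                            q2.getD s pvD = q1.getD (s - 1) pvD)) with _ | e
      · simp [pvMrg] <;> exact hv.symm
      · have : t ≤ e := le_trans (by omega) (pvFind?_range'_ge hte)
        simp [pvMrg, this] <;> exact hv.symm
    · simp only [hv, if_false]
      rw [List.find?_cons_of_neg (by simp <;> exact hv)]
      by_cases ht0 : 0 < t
      · -- t > 0: edge check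
        simp only [ht0, if_true]
        have ht1 : t - 1 < n := by omega
        have hprev : ((t : Int) - 1) = (((t - 1 : Nat) : Nat) : Int) := by omega
        rw [hprev, pvAccess p1 (t - 1) h1, pvAccess p2 (t - 1) h2,
            ← pvPad_getD p1 n (t - 1) h1 hn1 ht1, ← pvPad_getD p2 n (t - 1) h2 hn2 ht1,
            ← hq1, ← hq2]
        dsimp only
        have hre : List.range' (max t 1) (n - max t 1) =
            t :: List.range' (t + 1) fuel := by
          rw [show max t 1 = t by omega, show n - t = fuel + 1 by omega, List.range'_succ]
        by_cases hedge : q1.getD t pvD = q2.getD (t - 1) pvD ∧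
            q2.getD t pvD = q1.getD (t - 1) pvD
        · simp only [hedge, if_true]
          rw [hre, List.find?_cons_of_pos (by simp <;> exact ⟨hedge.1, hedge.2⟩)]
          rcases htv : (List.range' (t + 1) fuel).find?
              (fun s => decide (q1.getD s pvD = q2.getD s pvD)) with _ | v
          · simp [pvMrg] <;> exact hedge.1.symm
          · have : t + 1 ≤ v := pvFind?_range'_ge htv
            simp [pvMrg, show ¬ v ≤ t by omega] <;> exact hedge.1.symm
        · simp only [hedge, if_false]
          rw [hre, List.find?_cons_of_neg (by simp <;> exact fun h h' => hedge ⟨h, h'⟩)]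
          have := ih (t + 1) (by omega) (by omega)
          rw [show n - (t + 1) = fuel by omega] at this
          rw [this]
          rw [show max (t + 1) 1 = t + 1 by omega, show n - (t + 1) = fuel by omega]
      · -- t = 0
        simp only [ht0, if_false]
        have htz : t = 0 := by omega
        have := ih (t + 1) (by omega) (by omega)
        rw [show n - (t + 1) = fuel by omega] at this
        rw [this]
        rw [show max (t + 1) 1 = t + 1 by omega, show n - (t + 1) = fuel by omega, htz]
        simp [show n - 1 = fuel by omega]

lemma pvAlt_eq_mrg (p1 p2 : List (Int × Int)) :
    detect_conflict_alt p1 p2 =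
      pvMrg ((List.range' 0 (max p1.length p2.length)).find?
              (fun t => decide ((pvPad p1 (max p1.length p2.length)).getD t pvD =
                                (pvPad p2 (max p1.length p2.length)).getD t pvD)))
            ((List.range' 1 (max p1.length p2.length - 1)).find?
              (fun t => decide ((pvPad p1 (max p1.length p2.length)).getD t pvD =
                                (pvPad p2 (max p1.length p2.length)).getD (t - 1) pvD ∧
                                (pvPad p2 (max p1.length p2.length)).getD t pvD =
                                (pvPad p1 (max p1.length p2.length)).getD (t - 1) pvD)))
            (pvPad p1 (max p1.length p2.length)) := by
  unfold detect_conflict_alt pvMrg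
  rfl

-- ===== VERDICT (by name: the statement is the Claim_ definition above) =====
theorem detect_conflict_spec : Claim_equal_detect_conflict := by
  intro p1 p2 _ hpre
  unfold Spec_detect_conflict
  by_cases h1 : p1 = []
  · have h2 : p2 = [] := hpre.mp h1
    subst h1; subst h2
    rfl
  · have h2 : p2 ≠ [] := fun h => h1 (hpre.mpr h)
    unfold detect_conflict
    rw [pvAlt_eq_mrg]
    have := pvAGo_eq p1 p2 (max p1.length p2.length) h1 h2 (le_max_left _ _)
      (le_max_right _ _) 0 (by omega)
    simpa using this
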